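-- pv_equiv track=rewrite | github.com/Abiy-Alemu/Abiy-Alemu | Codeforces/B_Santa_and_his_colleagues.py | func
-- ===== SOURCE A (Python) =====
-- def func(guest,host,pile):
--
--     dic={}
--
--     for i in pile:
--         temp=dic.get(i,0)
--         dic[i]=temp+1
--
--     for i in guest:
--         temp=dic.get(i,0)
--         if(temp==0):
--             return False
--         dic[i]=temp-1
--
--     for i in host:
--         temp=dic.get(i,0)
--         if(temp==0):
--             return False
--         dic[i]=temp-1
--
--     for i in dic.values():
--         if(i>0):
--             return False
--
--     return True
-- ===== SOURCE B (Python) =====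
-- def func(guest, host, pile):
--     # pile must be exactly the multiset union of guest and host:
--     # compare canonical (sorted) forms instead of decrementing a count table.
--     return sorted(pile) == sorted(guest + host)
-- ===== Notes on version B (the rewrite author's own statement) =====
-- stated objective: simpler
-- what changed: The build-a-dict, decrement-with-early-return and final positive-count scan are all replaced by a single comparison of sorted(pile) with sorted(guest + host): no mutable table, no control flow.
import Mathlib
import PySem

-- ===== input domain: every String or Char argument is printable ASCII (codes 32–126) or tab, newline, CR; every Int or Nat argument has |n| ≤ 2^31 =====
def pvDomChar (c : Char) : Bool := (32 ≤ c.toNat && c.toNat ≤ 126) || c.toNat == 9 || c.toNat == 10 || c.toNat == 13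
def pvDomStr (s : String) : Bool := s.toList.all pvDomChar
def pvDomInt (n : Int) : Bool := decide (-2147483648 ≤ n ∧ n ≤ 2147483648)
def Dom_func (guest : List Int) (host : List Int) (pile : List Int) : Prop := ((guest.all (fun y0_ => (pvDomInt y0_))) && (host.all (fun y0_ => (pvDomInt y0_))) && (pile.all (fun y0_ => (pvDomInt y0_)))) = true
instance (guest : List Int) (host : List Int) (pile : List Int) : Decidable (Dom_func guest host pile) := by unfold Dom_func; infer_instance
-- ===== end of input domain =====

-- B replaces A's dict-build / decrement-with-early-return / final positive scan by one
-- comparison of the two sorted lists; same return value, objective: simpler.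

-- ===== PORT A =====
-- the 'for i in guest/host' loop: decrement, early 'return False' when the count is 0
def pvConsume (d : PySem.Dict Int Int) (xs : List Int) : Option (PySem.Dict Int Int) :=
  match xs with
  | [] => some d
  | i :: rest =>
    let temp := d.getD i 0
    if temp = 0 then none
    else pvConsume (d.insert i (temp - 1)) rest

def func (guest : List Int) (host : List Int) (pile : List Int) : Bool :=
  let dic := pile.foldl (fun d i => d.insert i (d.getD i 0 + 1)) PySem.Dict.empty
  match pvConsume dic guest with
  | none => false
  | some d1 =>
    match pvConsume d1 host with
    | none => false
    | some d2 => d2.values.all (fun v => !decide (v > 0))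

-- ===== PORT B =====
def func_alt (guest : List Int) (host : List Int) (pile : List Int) : Bool :=
  decide (PySem.List.sorted pile (fun x => x) false
            = PySem.List.sorted (guest ++ host) (fun x => x) false)

-- ===== PRECONDITION & SPEC =====
def Spec_func (guest : List Int) (host : List Int) (pile : List Int) (out : Bool) : Prop := out = func_alt guest host pile
instance (guest : List Int) (host : List Int) (pile : List Int) (out : Bool) : Decidable (Spec_func guest host pile out) := by unfold Spec_func; infer_instance

-- ===== CLAIM (what is proved, stated in full; the proofs are below) =====
def Claim_equal_func : Prop := ∀ (guest : List Int) (host : List Int) (pile : List Int), Dom_func guest host pile → Spec_func guest host pile (func guest host pile)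

-- ===== LEMMAS AND PROOFS =====

-- ===== VERDICT (by name: the statement is the Claim_ definition above) =====
lemma pvConsume_getD (xs : List Int) (d d' : PySem.Dict Int Int)
    (h : pvConsume d xs = some d') (k : Int) :
    d'.getD k 0 = d.getD k 0 - xs.count k := by
  induction xs generalizing d with
  | nil => simp [pvConsume] at h; subst h; simp
  | cons i rest ih =>
    simp only [pvConsume] at h
    split_ifs at h with h0
    have := ih _ h
    rw [this, PySem.Dict.getD_insert]
    by_cases hk : k = i <;> simp [hk, List.count_cons] <;> omega

lemma pvConsume_nodup (xs : List Int) (d d' : PySem.Dict Int Int)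
    (h : pvConsume d xs = some d') (hn : d.keys.Nodup) : d'.keys.Nodup := by
  induction xs generalizing d with
  | nil => simp [pvConsume] at h; subst h; exact hn
  | cons i rest ih =>
    simp only [pvConsume] at h
    split_ifs at h with h0
    exact ih _ h (PySem.Dict.nodup_keys_insert _ _ _ hn)

lemma pvConsume_isSome (xs : List Int) (d : PySem.Dict Int Int)
    (h0 : ∀ k, 0 ≤ d.getD k 0) :
    (pvConsume d xs).isSome = true ↔ ∀ k, (xs.count k : Int) ≤ d.getD k 0 := by
  induction xs generalizing d with
  | nil => simp [pvConsume, h0]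
  | cons i rest ih =>
    simp only [pvConsume]
    split_ifs with hz
    · simp only [Option.isSome_none, Bool.false_eq_true, false_iff, not_forall, not_le]
      exact ⟨i, by have := h0 i; simp; omega⟩
    · rw [ih]
      · constructor
        · intro h k
          have := h k
          rw [PySem.Dict.getD_insert] at this
          by_cases hk : k = i <;> simp [hk, List.count_cons] at this ⊢ <;> omega
        · intro h k
          have := h k
          rw [PySem.Dict.getD_insert]
          by_cases hk : k = i <;> simp [hk, List.count_cons] at this ⊢ <;> omega
      · intro k
        rw [PySem.Dict.getD_insert]
        by_cases hk : k = i
        · have := h0 i; simp [hk]; omega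
        · simp [hk]; exact h0 k

lemma getD_zero_of_not_mem_keys (d : PySem.Dict Int Int) (k : Int)
    (h : k ∉ d.keys) : d.getD k 0 = 0 := by
  apply PySem.Dict.getD_of_not_contains
  by_contra hc
  simp only [Bool.not_eq_false] at hc
  exact h ((PySem.Dict.contains_iff_mem_keys d k).mp hc)

lemma func_iff_count (guest host pile : List Int) :
    func guest host pile = true ↔
      ∀ k, (pile.count k : Int) = guest.count k + host.count k := by
  unfold func
  rw [PySem.Dict.foldl_insert_getD_add_one_eq_counter]
  have hc0 : ∀ k : Int, (PySem.Dict.counter pile).getD k 0 = (pile.count k : Int) :=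
    fun k => PySem.Dict.getD_counter pile k
  have hnn : ∀ k : Int, 0 ≤ (PySem.Dict.counter pile).getD k 0 := by
    intro k; rw [hc0]; positivity
  cases hg : pvConsume (PySem.Dict.counter pile) guest with
  | none =>
    simp only [hg, Bool.false_eq_true, false_iff]
    intro hall
    have hs := (pvConsume_isSome guest _ hnn).mpr
      (fun k => by rw [hc0]; have := hall k; omega)
    rw [hg] at hs; simp at hs
  | some d1 =>
    have hg1 : ∀ k : Int, (guest.count k : Int) ≤ (pile.count k : Int) := by
      intro k
      have := (pvConsume_isSome guest _ hnn).mp (by simp [hg]) k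
      rwa [hc0] at this
    have hd1 : ∀ k : Int, d1.getD k 0 = (pile.count k : Int) - guest.count k := by
      intro k; rw [pvConsume_getD guest _ d1 hg k, hc0]
    have hnn1 : ∀ k : Int, 0 ≤ d1.getD k 0 := by
      intro k; rw [hd1]; have := hg1 k; omega
    cases hh : pvConsume d1 host with
    | none =>
      simp only [hg, hh, Bool.false_eq_true, false_iff]
      intro hall
      have hs := (pvConsume_isSome host _ hnn1).mpr
        (fun k => by rw [hd1]; have := hall k; omega)
      rw [hh] at hs; simp at hs
    | some d2 =>
      have hh1 : ∀ k : Int, (host.count k : Int) ≤ d1.getD k 0 :=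
        (pvConsume_isSome host _ hnn1).mp (by simp [hh])
      have hd2 : ∀ k : Int, d2.getD k 0 = (pile.count k : Int) - guest.count k - host.count k := by
        intro k; rw [pvConsume_getD host _ d2 hh k, hd1]
      have hnd2 : d2.keys.Nodup :=
        pvConsume_nodup host _ d2 hh
          (pvConsume_nodup guest _ d1 hg (PySem.Dict.nodup_keys_counter pile))
      simp only [hg, hh]
      rw [PySem.Dict.values_eq_map_keys d2 hnd2 0]
      simp only [List.all_map, List.all_eq_true, Function.comp,
        Bool.not_eq_eq_eq_not, Bool.not_true, decide_eq_false_iff_not, not_lt]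
      constructor
      · intro h k
        have hle : d2.getD k 0 ≤ 0 := by
          by_cases hk : k ∈ d2.keys
          · exact h k hk
          · rw [getD_zero_of_not_mem_keys d2 k hk]
        have h1 := hh1 k
        have h2 := hd1 k
        rw [hd2] at hle
        omega
      · intro h k _
        rw [hd2]
        have := h k
        omega

theorem func_spec : Claim_equal_func := by
  intro guest host pile _
  unfold Spec_func func_alt
  rw [Bool.eq_iff_iff, func_iff_count]
  rw [decide_eq_true_iff, PySem.List.sorted_id_eq_sorted_id_iff_perm, List.perm_iff_count]
  constructor
  · intro h k; have := h k; simp [List.count_append]; omega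
  · intro h k; have := h k; simp [List.count_append] at this; omega
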